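-- pv_equiv track=rewrite | github.com/MdAbedin/binarysearch | 0501 - 0600/0542 Most Frequent Number in Intervals.py | solve
-- ===== SOURCE A (Python) =====
-- def solve(intervals):
--     endpoints = sorted(list({x for interval in intervals for x in interval}))
--     locs = {endpoints[i]:i for i in range(len(endpoints))}
--     counts = [0]*(len(endpoints)+1)
--
--     for l,r in intervals:
--         counts[locs[l]] += 1
--         counts[locs[r]+1] -= 1
--
--     count = 0
--     for i in range(len(counts)):
--         count += counts[i]
--         counts[i] = count
--
--     return max(endpoints,key=lambda x: [counts[locs[x]],-x])
-- ===== SOURCE B (Python) =====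
-- def solve(intervals):
--     candidates = sorted({x for interval in intervals for x in interval})
--
--     def coverage(x):
--         # number of intervals whose difference-array contribution covers x:
--         # those starting at or before x, minus those ending strictly before x
--         return sum(1 for l, r in intervals if l <= x) - sum(1 for l, r in intervals if r < x)
--
--     return max(candidates, key=lambda x: (coverage(x), -x))
-- ===== Notes on version B (the rewrite author's own statement) =====
-- stated objective: simpler
-- what changed: Replaces the coordinate-compression dict + difference array + prefix-sum machinery with a direct per-candidate count (intervals starting at or before x minus intervals ending before x) and a single max with the same tie-break key.
import Mathlib
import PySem

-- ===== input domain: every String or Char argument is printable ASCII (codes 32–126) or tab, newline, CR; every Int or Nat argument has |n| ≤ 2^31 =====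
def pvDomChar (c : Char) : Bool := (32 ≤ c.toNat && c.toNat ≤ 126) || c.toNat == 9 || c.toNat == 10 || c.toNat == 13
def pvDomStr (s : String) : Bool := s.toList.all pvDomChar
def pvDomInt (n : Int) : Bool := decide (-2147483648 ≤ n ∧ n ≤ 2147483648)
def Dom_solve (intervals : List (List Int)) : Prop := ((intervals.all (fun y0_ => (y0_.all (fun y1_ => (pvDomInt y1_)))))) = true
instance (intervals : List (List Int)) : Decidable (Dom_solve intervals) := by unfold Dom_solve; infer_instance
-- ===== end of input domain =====

-- B replaces A's coordinate-compression dict + difference array + prefix sums with a direct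
-- per-candidate count and the same max/tie-break key (objective: simpler; not faster).

-- ===== PORT A =====
def solve (intervals : List (List Int)) : Int :=
  let endpoints := PySem.List.sorted (PySem.Set.ofList (intervals.flatMap (fun interval => interval))) (fun x => x) false
  -- locs = {endpoints[i]: i for i in range(len(endpoints))}
  let locs := (PySem.List.pyRange 0 (endpoints.length : Int) 1).foldl
      (fun d i => d.insert (PySem.List.pyGetD endpoints i 0) i) (PySem.Dict.empty : PySem.Dict Int Int)
  -- counts = [0]*(len(endpoints)+1)
  let counts0 : List Int := List.replicate (endpoints.length + 1) 0
  -- for l,r in intervals: counts[locs[l]] += 1; counts[locs[r]+1] -= 1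
  -- (unpacking 'l, r' via index 0/1; Pre_ guarantees every interval has length 2, so every
  --  locs lookup hits a key and the .getD default is never used)
  let counts1 := intervals.foldl (fun cs interval =>
      let l := PySem.List.pyGetD interval 0 0
      let r := PySem.List.pyGetD interval 1 0
      let cs := PySem.List.pySetD cs (locs.getD l 0) (PySem.List.pyGetD cs (locs.getD l 0) 0 + 1)
      PySem.List.pySetD cs (locs.getD r 0 + 1) (PySem.List.pyGetD cs (locs.getD r 0 + 1) 0 - 1)) counts0
  -- count = 0; for i in range(len(counts)): count += counts[i]; counts[i] = count
  let st := (PySem.List.pyRange 0 (counts1.length : Int) 1).foldl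
      (fun (st : List Int × Int) i =>
        let count := st.2 + PySem.List.pyGetD st.1 i 0
        (PySem.List.pySetD st.1 i count, count)) (counts1, 0)
  -- max(endpoints, key=lambda x: [counts[locs[x]], -x]); the 2-element list key compares
  -- exactly like the pair key, so max2? is the faithful primitive. Python raises ValueError
  -- on an empty sequence; Pre_ excludes that, the 'none' branch is unreachable there.
  match PySem.List.max2? endpoints (fun x => PySem.List.pyGetD st.1 (locs.getD x 0) 0) (fun x => -x) with
  | some m => m
  | none => 0

-- ===== PORT B =====
-- coverage(x) = sum(1 for l,r in intervals if l <= x) - sum(1 for l,r in intervals if r < x)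
def pvCoverage (intervals : List (List Int)) (x : Int) : Int :=
  ((intervals.countP (fun interval => decide (PySem.List.pyGetD interval 0 0 ≤ x))) : Int)
  - ((intervals.countP (fun interval => decide (PySem.List.pyGetD interval 1 0 < x))) : Int)

def solve_alt (intervals : List (List Int)) : Int :=
  let candidates := PySem.List.sorted (PySem.Set.ofList (intervals.flatMap (fun interval => interval))) (fun x => x) false
  -- max(candidates, key=lambda x: (coverage(x), -x)); ValueError on empty excluded by Pre_
  match PySem.List.max2? candidates (fun x => pvCoverage intervals x) (fun x => -x) with
  | some m => m
  | none => 0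

-- ===== PRECONDITION & SPEC =====
-- Pre_ excludes exactly the inputs where Python A raises: an empty intervals list
-- (ValueError from max()) and any interval not of length 2 (ValueError from unpacking).
def Pre_solve (intervals : List (List Int)) : Prop :=
  intervals ≠ [] ∧ ∀ interval ∈ intervals, interval.length = 2
instance (intervals : List (List Int)) : Decidable (Pre_solve intervals) := by unfold Pre_solve; infer_instance

def pvWitness_solve : List (List Int) := [[1, 4], [2, 2], [5, 3]]

def Spec_solve (intervals : List (List Int)) (out : Int) : Prop := out = solve_alt intervals
instance (intervals : List (List Int)) (out : Int) : Decidable (Spec_solve intervals out) := by unfold Spec_solve; infer_instance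

-- ===== CLAIM (what is proved, stated in full; the proofs are below) =====
def Claim_equal_solve : Prop := ∀ (intervals : List (List Int)), Dom_solve intervals → Pre_solve intervals → Spec_solve intervals (solve intervals)

-- ===== LEMMAS AND PROOFS =====


-- proof-side mirrors of A's let-bound intermediates (definitionally equal to the port's)
def pvE (intervals : List (List Int)) : List Int :=
  PySem.List.sorted (PySem.Set.ofList (intervals.flatMap (fun interval => interval))) (fun x => x) false

def pvLocs (intervals : List (List Int)) : PySem.Dict Int Int :=
  (PySem.List.pyRange 0 ((pvE intervals).length : Int) 1).foldl
      (fun d i => d.insert (PySem.List.pyGetD (pvE intervals) i 0) i) (PySem.Dict.empty : PySem.Dict Int Int)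

def pvLoc (intervals : List (List Int)) (x : Int) : Int := (pvLocs intervals).getD x 0

def pvStep (intervals : List (List Int)) : List Int → List Int → List Int := fun cs interval =>
      let l := PySem.List.pyGetD interval 0 0
      let r := PySem.List.pyGetD interval 1 0
      let cs := PySem.List.pySetD cs ((pvLocs intervals).getD l 0) (PySem.List.pyGetD cs ((pvLocs intervals).getD l 0) 0 + 1)
      PySem.List.pySetD cs ((pvLocs intervals).getD r 0 + 1) (PySem.List.pyGetD cs ((pvLocs intervals).getD r 0 + 1) 0 - 1)

def pvCounts1 (intervals : List (List Int)) : List Int :=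
  intervals.foldl (pvStep intervals) (List.replicate ((pvE intervals).length + 1) 0)

def pvPre : (List Int × Int) → Int → (List Int × Int) := fun st i =>
        let count := st.2 + PySem.List.pyGetD st.1 i 0
        (PySem.List.pySetD st.1 i count, count)

def pvP (intervals : List (List Int)) : List Int :=
  ((PySem.List.pyRange 0 ((pvCounts1 intervals).length : Int) 1).foldl pvPre (pvCounts1 intervals, 0)).1

theorem solve_eq (intervals : List (List Int)) :
    solve intervals = match PySem.List.max2? (pvE intervals)
        (fun x => PySem.List.pyGetD (pvP intervals) ((pvLocs intervals).getD x 0) 0) (fun x => -x) with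
      | some m => m
      | none => 0 := rfl

theorem solve_alt_eq (intervals : List (List Int)) :
    solve_alt intervals = match PySem.List.max2? (pvE intervals)
        (fun x => pvCoverage intervals x) (fun x => -x) with
      | some m => m
      | none => 0 := rfl

theorem pvE_pairwise (intervals : List (List Int)) : (pvE intervals).Pairwise (· < ·) :=
  PySem.List.sorted_ofList_pairwise_lt _

theorem pvE_nodup (intervals : List (List Int)) : (pvE intervals).Nodup :=
  (pvE_pairwise intervals).nodup

theorem mem_pvE (intervals : List (List Int)) (x : Int) :
    x ∈ pvE intervals ↔ x ∈ intervals.flatMap (fun interval => interval) := by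
  simp [pvE, PySem.List.mem_sorted, PySem.Set.mem_ofList]

-- the locs dict sends E[j] to j
theorem locs_aux (E : List Int) (hE : E.Nodup) (n : Nat) (hn : n ≤ E.length) :
    ∀ j : Nat, ∀ hj : j < n,
    ((PySem.List.pyRange 0 (n : Int) 1).foldl
        (fun d i => d.insert (PySem.List.pyGetD E i 0) i)
        (PySem.Dict.empty : PySem.Dict Int Int)).getD (E[j]'(by omega)) 0 = (j : Int) := by
  induction n with
  | zero => intro j hj; omega
  | succ n ih =>
    intro j hj
    have h0 : (0:Int) ≤ (n:Int) := by positivity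
    have hsplit : PySem.List.pyRange 0 ((n:Int) + 1) 1 = PySem.List.pyRange 0 (n:Int) 1 ++ [(n:Int)] :=
      PySem.List.pyRange_one_succ_right h0
    have hcast : ((n+1 : Nat) : Int) = (n:Int) + 1 := by push_cast; ring
    rw [hcast, hsplit, List.foldl_append]
    simp only [List.foldl]
    have hEn : PySem.List.pyGetD E ((n:Int)) 0 = E[n]'(by omega) := by
      rw [PySem.List.pyGetD_natCast]; exact List.getD_eq_getElem _ _ (by omega)
    rw [hEn]
    by_cases hjn : j = n
    · subst hjn
      exact PySem.Dict.getD_insert_self _ _ _ _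
    · have hne : E[j]'(by omega) ≠ E[n]'(by omega) := by
        intro h
        exact hjn ((List.Nodup.getElem_inj_iff hE).mp h)
      rw [PySem.Dict.getD_insert_of_ne _ _ _ hne]
      exact ih (by omega) j (by omega)

theorem pvLoc_getElem (intervals : List (List Int)) (j : Nat) (hj : j < (pvE intervals).length) :
    pvLoc intervals ((pvE intervals)[j]) = (j : Int) :=
  locs_aux (pvE intervals) (pvE_nodup intervals) (pvE intervals).length le_rfl j hj

theorem pvLoc_mem (intervals : List (List Int)) (x : Int) (hx : x ∈ pvE intervals) :
    ∃ j : Nat, ∃ hj : j < (pvE intervals).length, (pvE intervals)[j] = x ∧ pvLoc intervals x = (j : Int) := by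
  obtain ⟨j, hj, hx⟩ := List.mem_iff_getElem.mp hx
  exact ⟨j, hj, hx, by rw [← hx]; exact pvLoc_getElem intervals j hj⟩

theorem pvLoc_bounds (intervals : List (List Int)) (x : Int) (hx : x ∈ pvE intervals) :
    0 ≤ pvLoc intervals x ∧ pvLoc intervals x < ((pvE intervals).length : Int) := by
  obtain ⟨j, hj, -, hloc⟩ := pvLoc_mem intervals x hx
  rw [hloc]; constructor <;> [positivity; exact_mod_cast hj]

-- order bridge: indices compare like values on the strictly sorted E
theorem pvLoc_le_iff (intervals : List (List Int)) (a b : Int)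
    (ha : a ∈ pvE intervals) (hb : b ∈ pvE intervals) :
    (pvLoc intervals a ≤ pvLoc intervals b ↔ a ≤ b) ∧ (pvLoc intervals a < pvLoc intervals b ↔ a < b) := by
  obtain ⟨i, hi, hia, hla⟩ := pvLoc_mem intervals a ha
  obtain ⟨j, hj, hjb, hlb⟩ := pvLoc_mem intervals b hb
  have hmono : ∀ p q (hp : p < (pvE intervals).length) (hq : q < (pvE intervals).length),
      p < q → (pvE intervals)[p] < (pvE intervals)[q] := by
    intro p q hp hq hpq
    exact (List.pairwise_iff_getElem.mp (pvE_pairwise intervals)) p q hp hq hpq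
  subst hia hjb
  rw [hla, hlb]
  constructor
  · constructor
    · intro h
      rcases Nat.lt_or_ge i j with h' | h'
      · exact le_of_lt (hmono i j hi hj h')
      · rcases Nat.eq_or_lt_of_le h' with h'' | h''
        · simp [h'']
        · exfalso; have := hmono j i hj hi h''; omega
    · intro h
      by_contra hc
      push Not at hc
      have : j < i := by exact_mod_cast hc
      have := hmono j i hj hi this
      omega
  · constructor
    · intro h
      have : i < j := by exact_mod_cast h
      exact hmono i j hi hj this
    · intro h
      by_contra hc
      push Not at hc
      have : j ≤ i := by exact_mod_cast hc
      rcases Nat.eq_or_lt_of_le this with h'' | h''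
      · subst h''; omega
      · have := hmono j i hj hi h''; omega

-- difference-array loop characterisation
theorem counts_fold (intervals : List (List Int)) (ivs : List (List Int)) (cs : List Int)
    (hb : ∀ iv ∈ ivs, 0 ≤ pvLoc intervals (PySem.List.pyGetD iv 0 0)
        ∧ pvLoc intervals (PySem.List.pyGetD iv 0 0) + 1 < (cs.length : Int)
        ∧ 0 ≤ pvLoc intervals (PySem.List.pyGetD iv 1 0)
        ∧ pvLoc intervals (PySem.List.pyGetD iv 1 0) + 1 < (cs.length : Int)) :
    (ivs.foldl (pvStep intervals) cs).length = cs.length ∧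
    ∀ i : Nat, i < cs.length →
      PySem.List.pyGetD (ivs.foldl (pvStep intervals) cs) (i : Int) 0 =
        PySem.List.pyGetD cs (i : Int) 0
        + ((ivs.countP (fun iv => decide (pvLoc intervals (PySem.List.pyGetD iv 0 0) = (i : Int)))) : Int)
        - ((ivs.countP (fun iv => decide (pvLoc intervals (PySem.List.pyGetD iv 1 0) + 1 = (i : Int)))) : Int) := by
  induction ivs generalizing cs with
  | nil => simp
  | cons iv rest ih =>
    obtain ⟨h0a, h0b, h1a, h1b⟩ := hb iv (by simp)
    set a := pvLoc intervals (PySem.List.pyGetD iv 0 0) with ha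
    set b := pvLoc intervals (PySem.List.pyGetD iv 1 0) + 1 with hbdef
    have hcs' : (pvStep intervals cs iv).length = cs.length := by
      simp [pvStep, PySem.List.length_pySetD]
    have hget : ∀ i : Nat, i < cs.length →
        PySem.List.pyGetD (pvStep intervals cs iv) (i : Int) 0 =
          PySem.List.pyGetD cs (i : Int) 0
          + (if a = (i : Int) then 1 else 0) - (if b = (i : Int) then 1 else 0) := by
      intro i hi
      have hA : a = ((a.toNat : Nat) : Int) := by omega
      have hB : b = ((b.toNat : Nat) : Int) := by omega
      have hAlen : a.toNat < cs.length := by omega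
      have hBlen : b.toNat < cs.length := by
        omega
      show PySem.List.pyGetD (PySem.List.pySetD
          (PySem.List.pySetD cs a (PySem.List.pyGetD cs a 0 + 1)) b
          (PySem.List.pyGetD (PySem.List.pySetD cs a (PySem.List.pyGetD cs a 0 + 1)) b 0 - 1)) (i : Int) 0 = _
      rw [hA, hB]
      rw [PySem.List.pyGetD_pySetD_natCast _ _ _ _ _ (by rw [PySem.List.length_pySetD]; exact hBlen)]
      rw [PySem.List.pyGetD_pySetD_natCast _ _ _ _ _ hAlen]
      rw [PySem.List.pyGetD_pySetD_natCast _ _ _ _ _ hAlen]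
      by_cases hib : i = b.toNat <;> by_cases hia : i = a.toNat <;>
        by_cases hab : b.toNat = a.toNat <;>
        simp [hib, hia, hab] <;> omega
    have hb' : ∀ jv ∈ rest, 0 ≤ pvLoc intervals (PySem.List.pyGetD jv 0 0)
        ∧ pvLoc intervals (PySem.List.pyGetD jv 0 0) + 1 < ((pvStep intervals cs iv).length : Int)
        ∧ 0 ≤ pvLoc intervals (PySem.List.pyGetD jv 1 0)
        ∧ pvLoc intervals (PySem.List.pyGetD jv 1 0) + 1 < ((pvStep intervals cs iv).length : Int) := by
      intro jv hjv; rw [hcs']; exact hb jv (by simp [hjv])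
    obtain ⟨ihlen, ihget⟩ := ih (pvStep intervals cs iv) hb'
    refine ⟨by simp [List.foldl_cons]; rw [ihlen, hcs'], ?_⟩
    intro i hi
    rw [List.foldl_cons, ihget i (by omega), hget i hi]
    simp only [List.countP_cons]
    by_cases h1 : a = (i:Int) <;> by_cases h2 : b = (i:Int) <;>
      simp [h1, h2, ha, hbdef] <;> omega

-- prefix-sum loop characterisation
theorem prefix_fold (cs : List Int) (n : Nat) (hn : n ≤ cs.length) :
    ((PySem.List.pyRange 0 (n : Int) 1).foldl pvPre (cs, 0)).1.length = cs.length ∧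
    ∀ t : Nat, t < cs.length →
      PySem.List.pyGetD ((PySem.List.pyRange 0 (n : Int) 1).foldl pvPre (cs, 0)).1 (t : Int) 0 =
        if t < n then (cs.take (t+1)).sum else PySem.List.pyGetD cs (t : Int) 0 := by
  have key : ∀ n : Nat, n ≤ cs.length →
      ((PySem.List.pyRange 0 (n : Int) 1).foldl pvPre (cs, 0)).1.length = cs.length ∧
      ((PySem.List.pyRange 0 (n : Int) 1).foldl pvPre (cs, 0)).2 = (cs.take n).sum ∧
      ∀ t : Nat, t < cs.length →
        PySem.List.pyGetD ((PySem.List.pyRange 0 (n : Int) 1).foldl pvPre (cs, 0)).1 (t : Int) 0 =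
          if t < n then (cs.take (t+1)).sum else PySem.List.pyGetD cs (t : Int) 0 := by
    intro n
    induction n with
    | zero =>
      intro _
      refine ⟨rfl, by simp, ?_⟩
      intro t ht
      simp
    | succ n ih =>
      intro hn1
      obtain ⟨ihlen, ihacc, ihget⟩ := ih (by omega)
      have h0 : (0:Int) ≤ (n:Int) := by positivity
      have hsplit : PySem.List.pyRange 0 ((n:Int) + 1) 1 = PySem.List.pyRange 0 (n:Int) 1 ++ [(n:Int)] :=
        PySem.List.pyRange_one_succ_right h0
      have hcast : ((n+1 : Nat) : Int) = (n:Int) + 1 := by push_cast; ring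
      rw [hcast, hsplit, List.foldl_append]
      set st := (PySem.List.pyRange 0 (n:Int) 1).foldl pvPre (cs, 0) with hst
      have hread : PySem.List.pyGetD st.1 (n:Int) 0 = PySem.List.pyGetD cs (n:Int) 0 := by
        have := ihget n (by omega)
        simp only [Nat.lt_irrefl, if_false] at this
        exact this
      have hcsn : PySem.List.pyGetD cs (n:Int) 0 = cs[n]'(by omega) := by
        rw [PySem.List.pyGetD_natCast]; exact List.getD_eq_getElem _ _ (by omega)
      have hacc' : (pvPre st (n:Int)).2 = (cs.take (n+1)).sum := by
        simp only [pvPre, hread, hcsn, ihacc]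
        rw [List.sum_take_succ _ _ (by omega)]
      simp only [List.foldl_cons, List.foldl_nil]
      refine ⟨?_, hacc', ?_⟩
      · simp only [pvPre, PySem.List.length_pySetD]; exact ihlen
      · intro t ht
        simp only [pvPre]
        rw [PySem.List.pyGetD_pySetD_natCast _ _ _ _ _ (by rw [ihlen]; omega)]
        by_cases htn : t = n
        · subst htn
          rw [if_pos rfl, if_pos (by omega)]
          simp only [hread, hcsn, ihacc]
          rw [List.sum_take_succ _ _ (by omega)]
        · rw [if_neg htn, ihget t ht]
          by_cases h1 : t < n
          · rw [if_pos h1, if_pos (by omega)]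
          · rw [if_neg h1, if_neg (by omega)]
  exact ⟨(key n hn).1, (key n hn).2.2⟩

theorem countP_lt_succ (l : List (List Int)) (f : List Int → Int) (k : Int) :
    (l.countP fun a => decide (f a < k+1)) = (l.countP fun a => decide (f a < k)) + (l.countP fun a => decide (f a = k)) := by
  induction l with
  | nil => simp
  | cons a t ih =>
    simp only [List.countP_cons, ih]
    by_cases h1 : f a < k + 1 <;> by_cases h2 : f a < k <;> by_cases h3 : f a = k <;>
      simp [h1, h2, h3] <;> omega

theorem interval_len_two (iv : List Int) (h : iv.length = 2) : ∃ a b : Int, iv = [a, b] := by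
  match iv, h with
  | [a, b], _ => exact ⟨a, b, rfl⟩

theorem mem_endpoints (intervals : List (List Int)) (hpre : ∀ iv ∈ intervals, iv.length = 2)
    (iv : List Int) (hiv : iv ∈ intervals) :
    PySem.List.pyGetD iv 0 0 ∈ pvE intervals ∧ PySem.List.pyGetD iv 1 0 ∈ pvE intervals := by
  obtain ⟨a, b, rfl⟩ := interval_len_two iv (hpre iv hiv)
  rw [mem_pvE, mem_pvE]
  constructor
  · exact List.mem_flatMap.mpr ⟨[a, b], hiv, by show a ∈ [a,b]; simp⟩
  · exact List.mem_flatMap.mpr ⟨[a, b], hiv, by show b ∈ [a,b]; simp⟩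

theorem counts1_facts (intervals : List (List Int)) (hpre : ∀ iv ∈ intervals, iv.length = 2) :
    (pvCounts1 intervals).length = (pvE intervals).length + 1 ∧
    ∀ i : Nat, i < (pvE intervals).length + 1 →
      PySem.List.pyGetD (pvCounts1 intervals) (i : Int) 0 =
        ((intervals.countP (fun iv => decide (pvLoc intervals (PySem.List.pyGetD iv 0 0) = (i : Int)))) : Int)
        - ((intervals.countP (fun iv => decide (pvLoc intervals (PySem.List.pyGetD iv 1 0) + 1 = (i : Int)))) : Int) := by
  have hlen0 : (List.replicate ((pvE intervals).length + 1) (0:Int)).length = (pvE intervals).length + 1 := by simp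
  have hb : ∀ iv ∈ intervals, 0 ≤ pvLoc intervals (PySem.List.pyGetD iv 0 0)
      ∧ pvLoc intervals (PySem.List.pyGetD iv 0 0) + 1 < ((List.replicate ((pvE intervals).length + 1) (0:Int)).length : Int)
      ∧ 0 ≤ pvLoc intervals (PySem.List.pyGetD iv 1 0)
      ∧ pvLoc intervals (PySem.List.pyGetD iv 1 0) + 1 < ((List.replicate ((pvE intervals).length + 1) (0:Int)).length : Int) := by
    intro iv hiv
    obtain ⟨hm0, hm1⟩ := mem_endpoints intervals hpre iv hiv
    obtain ⟨ha0, ha1⟩ := pvLoc_bounds intervals _ hm0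
    obtain ⟨hb0, hb1⟩ := pvLoc_bounds intervals _ hm1
    rw [hlen0]
    push_cast
    refine ⟨ha0, by omega, hb0, by omega⟩
  obtain ⟨hl, hg⟩ := counts_fold intervals intervals (List.replicate ((pvE intervals).length + 1) 0) hb
  constructor
  · rw [pvCounts1, hl, hlen0]
  · intro i hi
    have := hg i (by rw [hlen0]; omega)
    rw [pvCounts1, this]
    have hz : PySem.List.pyGetD (List.replicate ((pvE intervals).length + 1) (0:Int)) (i : Int) 0 = 0 := by
      rw [PySem.List.pyGetD_natCast]
      simp [List.getD]
    rw [hz]; ring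

theorem take_sum_eq (intervals : List (List Int)) (hpre : ∀ iv ∈ intervals, iv.length = 2) :
    ∀ k : Nat, k ≤ (pvE intervals).length + 1 →
    ((pvCounts1 intervals).take k).sum =
      ((intervals.countP fun iv => decide (pvLoc intervals (PySem.List.pyGetD iv 0 0) < (k:Int))) : Int)
      - ((intervals.countP fun iv => decide (pvLoc intervals (PySem.List.pyGetD iv 1 0) + 1 < (k:Int))) : Int) := by
  obtain ⟨hlen, hget⟩ := counts1_facts intervals hpre
  intro k
  induction k with
  | zero =>
    intro _
    have h1 : (intervals.countP fun iv => decide (pvLoc intervals (PySem.List.pyGetD iv 0 0) < (0:Int))) = 0 := by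
      rw [List.countP_eq_zero]
      intro iv hiv
      have := (pvLoc_bounds intervals _ (mem_endpoints intervals hpre iv hiv).1).1
      simp; omega
    have h2 : (intervals.countP fun iv => decide (pvLoc intervals (PySem.List.pyGetD iv 1 0) + 1 < (0:Int))) = 0 := by
      rw [List.countP_eq_zero]
      intro iv hiv
      have := (pvLoc_bounds intervals _ (mem_endpoints intervals hpre iv hiv).2).1
      simp; omega
    simp [h1, h2]
  | succ k ih =>
    intro hk1
    have hk : k < (pvCounts1 intervals).length := by omega
    rw [List.sum_take_succ _ _ hk, ih (by omega)]
    have hgk : (pvCounts1 intervals)[k] = PySem.List.pyGetD (pvCounts1 intervals) (k : Int) 0 := by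
      rw [PySem.List.pyGetD_natCast]
      exact (List.getD_eq_getElem _ _ hk).symm
    rw [hgk, hget k (by omega)]
    have hc1 : ((k:Int) + 1) = ((k+1 : Nat) : Int) := by push_cast; ring
    have e1 := countP_lt_succ intervals (fun iv => pvLoc intervals (PySem.List.pyGetD iv 0 0)) (k:Int)
    have e2 := countP_lt_succ intervals (fun iv => pvLoc intervals (PySem.List.pyGetD iv 1 0) + 1) (k:Int)
    simp only at e1 e2
    rw [← hc1]
    push_cast [e1, e2]
    ring

theorem key_eq (intervals : List (List Int)) (hpre : ∀ iv ∈ intervals, iv.length = 2) :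
    ∀ x ∈ pvE intervals,
      PySem.List.pyGetD (pvP intervals) ((pvLocs intervals).getD x 0) 0 = pvCoverage intervals x := by
  intro x hx
  obtain ⟨jx, hjx, hEx, hlx⟩ := pvLoc_mem intervals x hx
  obtain ⟨hlen, _⟩ := counts1_facts intervals hpre
  obtain ⟨_, hPget⟩ := prefix_fold (pvCounts1 intervals) (pvCounts1 intervals).length le_rfl
  have hloc : (pvLocs intervals).getD x 0 = (jx : Int) := hlx
  rw [hloc]
  have hjlen : jx < (pvCounts1 intervals).length := by omega
  have : PySem.List.pyGetD (pvP intervals) (jx : Int) 0 = ((pvCounts1 intervals).take (jx+1)).sum := by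
    rw [pvP]
    rw [hPget jx hjlen, if_pos hjlen]
  rw [this, take_sum_eq intervals hpre (jx+1) (by omega)]
  have hcongr1 : (intervals.countP fun iv => decide (pvLoc intervals (PySem.List.pyGetD iv 0 0) < ((jx+1:Nat):Int)))
      = intervals.countP fun iv => decide (PySem.List.pyGetD iv 0 0 ≤ x) := by
    apply List.countP_congr
    intro iv hiv
    have hm := (mem_endpoints intervals hpre iv hiv).1
    have hord := (pvLoc_le_iff intervals _ x hm hx).1
    rw [hlx] at hord
    simp only [decide_eq_true_eq]
    constructor
    · intro h; exact hord.mp (by push_cast at h ⊢; omega)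
    · intro h; have := hord.mpr h; push_cast; omega
  have hcongr2 : (intervals.countP fun iv => decide (pvLoc intervals (PySem.List.pyGetD iv 1 0) + 1 < ((jx+1:Nat):Int)))
      = intervals.countP fun iv => decide (PySem.List.pyGetD iv 1 0 < x) := by
    apply List.countP_congr
    intro iv hiv
    have hm := (mem_endpoints intervals hpre iv hiv).2
    have hord := (pvLoc_le_iff intervals _ x hm hx).2
    rw [hlx] at hord
    simp only [decide_eq_true_eq]
    constructor
    · intro h; exact hord.mp (by push_cast at h ⊢; omega)
    · intro h; have := hord.mpr h; push_cast; omega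
  rw [hcongr1, hcongr2, pvCoverage]

theorem max2_congr {α : Type} (k2 : α → Int) (xs : List α) (k1 k1' : α → Int)
    (h : ∀ x ∈ xs, k1 x = k1' x) :
    PySem.List.max2? xs k1 k2 = PySem.List.max2? xs k1' k2 := by
  have H : ∀ (t : List α) (acc : Option α),
      (∀ x ∈ t, k1 x = k1' x) → (∀ m, acc = some m → k1 m = k1' m) →
      List.foldl (fun acc x => match acc with
        | none => some x
        | some m => if (decide (k1 m < k1 x) || !decide (k1 x < k1 m) && decide (k2 m < k2 x)) = true then some x else some m) acc t
      = List.foldl (fun acc x => match acc with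
        | none => some x
        | some m => if (decide (k1' m < k1' x) || !decide (k1' x < k1' m) && decide (k2 m < k2 x)) = true then some x else some m) acc t := by
    intro t
    induction t with
    | nil => intros; rfl
    | cons x t ih =>
      intro acc h hacc
      have hx : k1 x = k1' x := h x (by simp)
      simp only [List.foldl_cons]
      match acc with
      | none =>
        exact ih (some x) (fun y hy => h y (by simp [hy])) (fun m hm => by cases hm; exact hx)
      | some m =>
        have hm : k1 m = k1' m := hacc m rfl
        show List.foldl (fun acc x => match acc with
            | none => some x
            | some m => if (decide (k1 m < k1 x) || !decide (k1 x < k1 m) && decide (k2 m < k2 x)) = true then some x else some m)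
            (if (decide (k1 m < k1 x) || !decide (k1 x < k1 m) && decide (k2 m < k2 x)) = true then some x else some m) t
          = List.foldl (fun acc x => match acc with
            | none => some x
            | some m => if (decide (k1' m < k1' x) || !decide (k1' x < k1' m) && decide (k2 m < k2 x)) = true then some x else some m)
            (if (decide (k1' m < k1' x) || !decide (k1' x < k1' m) && decide (k2 m < k2 x)) = true then some x else some m) t
        rw [hm, hx]
        by_cases hc : (decide (k1' m < k1' x) || !decide (k1' x < k1' m) && decide (k2 m < k2 x)) = true
        · rw [if_pos hc]
          exact ih (some x) (fun y hy => h y (by simp [hy])) (fun m' hm' => by cases hm'; exact hx)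
        · rw [if_neg hc]
          exact ih (some m) (fun y hy => h y (by simp [hy])) (fun m' hm' => by cases hm'; exact hm)
  exact H xs none h (by intro m hm; cases hm)

-- ===== VERDICT (by name: the statement is the Claim_ definition above) =====
theorem solve_spec : Claim_equal_solve := by
  intro intervals hdom hpre
  show solve intervals = solve_alt intervals
  rw [solve_eq, solve_alt_eq]
  rw [max2_congr (fun x => -x) (pvE intervals)
      (fun x => PySem.List.pyGetD (pvP intervals) ((pvLocs intervals).getD x 0) 0)
      (fun x => pvCoverage intervals x)
      (key_eq intervals hpre.2)]
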